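-- pv_equiv track=rewrite | github.com/imollo/SplifferGenerator | words.py | is_canonical_parikh
-- ===== SOURCE A (Python) =====
-- def is_canonical_parikh(p):
--     """
--     Given a vector, it returns True iff
--     at least one canonical word has it
--     as a Parikh vector.
--     """
--     l = [i for i in range(len(p)) if p[i]==0]
--     try:
--         min = l[0]
--     except IndexError:
--         return True
--     for j in range(len(l)):
--         l[j] = l[j]-min
--     return l==list(range(len(l)))
-- ===== SOURCE B (Python) =====
-- def is_canonical_parikh(p):
--     """
--     Given a vector, it returns True iff
--     at least one canonical word has it
--     as a Parikh vector.
--     """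
--     first = -1
--     last = -1
--     count = 0
--     for i in range(len(p)):
--         if p[i] == 0:
--             if count == 0:
--                 first = i
--             last = i
--             count += 1
--     if count == 0:
--         return True
--     return last - first + 1 == count
-- ===== Notes on version B (the rewrite author's own statement) =====
-- stated objective: simpler
-- what changed: Instead of materializing the list of zero positions, shifting it by its minimum in a second loop and comparing it to list(range(...)), B keeps three scalars (first zero index, last zero index, zero count) in one pass and returns (last - first + 1) == count, which holds exactly when the zero positions are contiguous.
import Mathlib
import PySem

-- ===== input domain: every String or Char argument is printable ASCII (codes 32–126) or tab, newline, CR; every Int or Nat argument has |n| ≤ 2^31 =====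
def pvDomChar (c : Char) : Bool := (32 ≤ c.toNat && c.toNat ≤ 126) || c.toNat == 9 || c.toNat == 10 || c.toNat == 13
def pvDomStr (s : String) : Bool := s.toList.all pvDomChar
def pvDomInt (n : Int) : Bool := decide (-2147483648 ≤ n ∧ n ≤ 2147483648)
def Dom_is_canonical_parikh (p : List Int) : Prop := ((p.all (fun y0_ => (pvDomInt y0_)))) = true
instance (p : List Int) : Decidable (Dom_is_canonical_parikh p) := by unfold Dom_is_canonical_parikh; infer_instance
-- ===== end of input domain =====

-- B replaces A's "collect zero positions, shift by the minimum, compare to range" with a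
-- one-pass scan keeping three scalars (first/last zero index and zero count); objective: simpler.

-- ===== PORT A =====
def is_canonical_parikh (p : List Int) : Bool :=
  -- l = [i for i in range(len(p)) if p[i]==0]
  let l : List Int :=
    (PySem.List.pyRange 0 (p.length : Int) 1).filter (fun i => PySem.List.pyGet? p i == some 0)
  match l with
  | [] => true              -- except IndexError: return True
  | min :: _ =>
    -- for j in range(len(l)): l[j] = l[j]-min   (in-place elementwise update)
    let l2 := l.map (fun x => x - min)
    -- return l == list(range(len(l)))
    l2 == PySem.List.pyRange 0 (l2.length : Int) 1

-- ===== PORT B =====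
def is_canonical_parikh_alt (p : List Int) : Bool :=
  let s : Int × Int × Int :=
    (PySem.List.pyRange 0 (p.length : Int) 1).foldl
      (fun (st : Int × Int × Int) i =>
        if PySem.List.pyGet? p i == some 0 then
          (if st.2.2 == 0 then i else st.1, i, st.2.2 + 1)
        else st)
      (-1, -1, 0)
  if s.2.2 == 0 then true else decide (s.2.1 - s.1 + 1 = s.2.2)

-- ===== PRECONDITION & SPEC =====
def Spec_is_canonical_parikh (p : List Int) (out : Bool) : Prop := out = is_canonical_parikh_alt p
instance (p : List Int) (out : Bool) : Decidable (Spec_is_canonical_parikh p out) := by unfold Spec_is_canonical_parikh; infer_instance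

-- ===== CLAIM (what is proved, stated in full; the proofs are below) =====
def Claim_equal_is_canonical_parikh : Prop := ∀ (p : List Int), Dom_is_canonical_parikh p → Spec_is_canonical_parikh p (is_canonical_parikh p)

-- ===== LEMMAS AND PROOFS =====

-- the filtered zero-position list is strictly increasing
lemma pv_zs_pairwise (p : List Int) :
    ((PySem.List.pyRange 0 (p.length : Int) 1).filter
      (fun i => PySem.List.pyGet? p i == some 0)).Pairwise (· < ·) :=
  (PySem.List.pairwise_lt_pyRange_one 0 (p.length : Int)).filter _

-- B's loop state after scanning a nonempty zero-position list
lemma pv_foldl_state (x : Int) (t : List Int) :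
    List.foldl
      (fun (st : Int × Int × Int) i =>
        (if st.2.2 == 0 then i else st.1, i, st.2.2 + 1)) (-1, -1, 0) (x :: t)
    = (x, t.getLastD x, 1 + (t.length : Int)) := by
  induction t using List.reverseRecOn with
  | nil => simp
  | append_singleton t y ih =>
    rw [← List.cons_append, List.foldl_append, ih]
    have hne : ((1 + (t.length : Int)) == 0) = false := by
      simp only [beq_eq_false_iff_ne, ne_eq]
      omega
    simp
    refine ⟨fun hh => absurd hh (by omega), by ring⟩

-- consecutive-gap bound for a strictly increasing integer list
lemma pv_gap (zs : List Int) (hp : zs.Pairwise (· < ·)) :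
    ∀ (i j : Nat) (hij : i ≤ j) (hj : j < zs.length),
      zs[i]'(Nat.lt_of_le_of_lt hij hj) + ((j : Int) - (i : Int)) ≤ zs[j] := by
  intro i j
  induction j with
  | zero =>
    intro hij hj
    have : i = 0 := Nat.le_zero.mp hij
    subst this
    simp
  | succ j ih =>
    intro hij hj
    rcases Nat.eq_or_lt_of_le hij with rfl | hlt
    · simp
    · have hij' : i ≤ j := Nat.lt_succ_iff.mp hlt
      have hj' : j < zs.length := Nat.lt_of_succ_lt hj
      have h1 := ih hij' hj'
      have h2 : zs[j] < zs[j + 1] :=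
        List.pairwise_iff_getElem.mp hp j (j + 1) hj' hj (Nat.lt_succ_self j)
      push_cast at *
      omega

-- the normalized zero list equals range(len) iff last - first + 1 = len
lemma pv_main_char (h : Int) (t : List Int) (hp : (h :: t).Pairwise (· < ·)) :
    ((h :: t).map (fun x => x - h) = PySem.List.pyRange 0 (((h :: t).map (fun x => x - h)).length : Int) 1)
    ↔ (t.getLastD h - h + 1 = 1 + (t.length : Int)) := by
  have hlen : ((h :: t).map (fun x => x - h)).length = t.length + 1 := by simp
  have hlast : t.getLastD h = (h :: t)[t.length]'(by simp) := by
    rw [← List.getLast_eq_getLastD (h := by simp), List.getLast_eq_getElem]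
    simp
    rfl
  rw [hlen]
  constructor
  · intro heq
    have hidx : t.length < ((h :: t).map (fun x => x - h)).length := by simp
    have := List.getElem_of_eq heq hidx
    rw [List.getElem_map] at this
    rw [PySem.List.getElem_pyRange_one] at this
    rw [hlast]
    omega
  · intro hl
    rw [hlast] at hl
    apply List.ext_getElem
    · simp
    · intro k hk1 hk2
      rw [List.getElem_map, PySem.List.getElem_pyRange_one]
      have hk : k < (h :: t).length := by simpa using hk1
      have hlow := pv_gap (h :: t) hp 0 k (Nat.zero_le k) hk
      have hhigh := pv_gap (h :: t) hp k t.length (by simp at hk1; omega) (by simp)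
      simp only [List.getElem_cons_zero] at hlow
      push_cast at hlow hhigh hl ⊢
      omega

-- ===== VERDICT (by name: the statement is the Claim_ definition above) =====
theorem is_canonical_parikh_spec : Claim_equal_is_canonical_parikh := by
  intro p _
  unfold Spec_is_canonical_parikh is_canonical_parikh is_canonical_parikh_alt
  rw [PySem.List.foldl_if_eq_foldl_filter]
  have hp := pv_zs_pairwise p
  cases hzs : (PySem.List.pyRange 0 (p.length : Int) 1).filter
      (fun i => PySem.List.pyGet? p i == some 0) with
  | nil => simp
  | cons h t =>
    rw [hzs] at hp
    rw [pv_foldl_state]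
    rw [if_neg (by simp; omega : ¬ (((1 + (t.length : Int)) == 0) = true))]
    apply Bool.eq_iff_iff.mpr
    simp only [beq_iff_eq, decide_eq_true_eq]
    exact pv_main_char h t hp
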